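-- pv_equiv track=rewrite | github.com/DavidMiklo/Information-Retrieval-Project | common.py | preprocess_abstracts
-- ===== SOURCE A (Python) =====
-- def preprocess_abstracts(lines):
--     abstracts = []
--     current_id = None
--     current_abstract = []
--
--     for line in lines:
--         if line.isspace():
--             continue
--         if line.startswith('###'):
--             if current_id is not None:
--                 abstracts.append({'id': current_id, 'abstract': ' '.join(current_abstract)})
--             current_id = line[3:].strip()
--             current_abstract = []
--         else:
--             line_content = line.split('\t')[1].strip() if '\t' in line else line.strip()
--             current_abstract.append(line_content)
--
--     if current_id is not None:
--         abstracts.append({'id': current_id, 'abstract': ' '.join(current_abstract)})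
--
--     return abstracts
-- ===== SOURCE B (Python) =====
-- def _clean(line):
--     return line.split('\t')[1].strip() if '\t' in line else line.strip()
--
--
-- def preprocess_abstracts(lines):
--     # pass 1: keep non-whitespace lines, drop any preamble before the first header
--     content = [l for l in lines if not l.isspace()]
--     i = 0
--     while i < len(content) and not content[i].startswith('###'):
--         i += 1
--     # pass 2: cut [i:] into (header, body) blocks and map each to a record
--     records = []
--     while i < len(content):
--         header = content[i]
--         j = i + 1
--         while j < len(content) and not content[j].startswith('###'):
--             j += 1
--         records.append({'id': header[3:].strip(),
--                         'abstract': ' '.join(_clean(l) for l in content[i + 1:j])})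
--         i = j
--     return records
-- ===== Notes on version B (the rewrite author's own statement) =====
-- stated objective: simpler
-- what changed: Replaced A's flush-on-boundary state machine (current_id/current_abstract mutated per line, flushed at each header and at the end) by a two-pass decomposition: filter whitespace lines and drop the preamble, then cut the remaining lines into header-delimited blocks and map each block to its record.
import Mathlib
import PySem

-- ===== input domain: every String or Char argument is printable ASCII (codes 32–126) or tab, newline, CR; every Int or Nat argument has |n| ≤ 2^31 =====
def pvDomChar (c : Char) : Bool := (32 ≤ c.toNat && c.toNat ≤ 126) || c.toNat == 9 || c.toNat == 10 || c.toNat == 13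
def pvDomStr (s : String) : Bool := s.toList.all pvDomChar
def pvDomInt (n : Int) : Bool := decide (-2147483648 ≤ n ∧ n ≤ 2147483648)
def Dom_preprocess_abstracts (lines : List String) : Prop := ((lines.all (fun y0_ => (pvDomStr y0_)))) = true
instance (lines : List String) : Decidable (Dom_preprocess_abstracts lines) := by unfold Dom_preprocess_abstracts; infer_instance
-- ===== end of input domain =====

-- Port/equivalence of preprocess_abstracts: B replaces A's flush-on-boundary state
-- machine by a filter + partition-into-blocks + map decomposition (objective: simpler).

-- ===== PORT A =====
-- state: (abstracts, current_id, current_abstract)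
def paStep (st : List (List (String × String)) × Option String × List String) (line : String) :
    List (List (String × String)) × Option String × List String :=
  let (abstracts, current_id, current_abstract) := st
  if PySem.Str.strIsspace line then st
  else if PySem.Str.startswith line "###" then
    let abstracts' := match current_id with
      | some cid => abstracts ++ [[("id", cid), ("abstract", PySem.Str.join " " current_abstract)]]
      | none => abstracts
    (abstracts', some (PySem.Str.strip (PySem.Str.slice line (some 3) none)), [])
  else
    -- '\t' in line guarantees split('\t') has a second element, so [1] never raises
    let line_content :=
      if PySem.Str.isIn "\t" line then
        PySem.Str.strip (PySem.List.pyGetD ((PySem.Str.split? line "\t").getD []) 1 "")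
      else PySem.Str.strip line
    (abstracts, current_id, current_abstract ++ [line_content])

def preprocess_abstracts (lines : List String) : List (List (String × String)) :=
  let st := lines.foldl paStep ([], none, [])
  match st with
  | (abstracts, some cid, cur) =>
      abstracts ++ [[("id", cid), ("abstract", PySem.Str.join " " cur)]]
  | (abstracts, none, _) => abstracts

-- ===== PORT B =====
def pbClean (line : String) : String :=
  if PySem.Str.isIn "\t" line then
    PySem.Str.strip (PySem.List.pyGetD ((PySem.Str.split? line "\t").getD []) 1 "")
  else PySem.Str.strip line

def pbNotHeader (line : String) : Bool := !PySem.Str.startswith line "###"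

-- pass 2 of Source B: cut the list into (header, body) blocks, map each to a record
def pbRecords : List String → List (List (String × String))
  | [] => []
  | h :: rest =>
    [("id", PySem.Str.strip (PySem.Str.slice h (some 3) none)),
     ("abstract", PySem.Str.join " " ((rest.takeWhile pbNotHeader).map pbClean))] ::
      pbRecords (rest.dropWhile pbNotHeader)
  termination_by l => l.length
  decreasing_by
    exact Nat.lt_succ_of_le (rest.length_dropWhile_le pbNotHeader)

def preprocess_abstracts_alt (lines : List String) : List (List (String × String)) :=
  pbRecords ((lines.filter (fun l => !PySem.Str.strIsspace l)).dropWhile pbNotHeader)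

-- ===== PRECONDITION & SPEC =====
def Spec_preprocess_abstracts (lines : List String) (out : List (List (String × String))) : Prop := out = preprocess_abstracts_alt lines
instance (lines : List String) (out : List (List (String × String))) : Decidable (Spec_preprocess_abstracts lines out) := by unfold Spec_preprocess_abstracts; infer_instance

-- ===== CLAIM (what is proved, stated in full; the proofs are below) =====
def Claim_equal_preprocess_abstracts : Prop := ∀ (lines : List String), Dom_preprocess_abstracts lines → Spec_preprocess_abstracts lines (preprocess_abstracts lines)

-- ===== LEMMAS AND PROOFS =====
theorem pbRecords_nil : pbRecords [] = [] := by rw [pbRecords.eq_def]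

theorem pbRecords_cons (h : String) (rest : List String) :
    pbRecords (h :: rest) =
      [("id", PySem.Str.strip (PySem.Str.slice h (some 3) none)),
       ("abstract", PySem.Str.join " " ((rest.takeWhile pbNotHeader).map pbClean))] ::
        pbRecords (rest.dropWhile pbNotHeader) := by
  rw [pbRecords.eq_def]

-- finish: A's final flush applied to an intermediate state
def paFinish (st : List (List (String × String)) × Option String × List String) :
    List (List (String × String)) :=
  match st with
  | (abstracts, some cid, cur) =>
      abstracts ++ [[("id", cid), ("abstract", PySem.Str.join " " cur)]]
  | (abstracts, none, _) => abstracts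

def paRec (cid : String) (cur : List String) : List (String × String) :=
  [("id", cid), ("abstract", PySem.Str.join " " cur)]

-- A's fold ignores whitespace-only lines
theorem paFold_filter (l : List String) (st : List (List (String × String)) × Option String × List String) :
    l.foldl paStep st = (l.filter (fun x => !PySem.Str.strIsspace x)).foldl paStep st := by
  induction l generalizing st with
  | nil => rfl
  | cons h t ih =>
    by_cases hs : PySem.Chars.strIsspace h.toList = true
    · have e : paStep st h = st := by simp [paStep, hs]
      simp [hs, e, ih]
    · simp [hs, ih]

-- invariant of A's state machine over a whitespace-free list
theorem paFold_spec (l : List String) (hl : ∀ x ∈ l, PySem.Chars.strIsspace x.toList = false)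
    (acc : List (List (String × String))) (oid : Option String) (cur : List String) :
    paFinish (l.foldl paStep (acc, oid, cur)) =
      match oid with
      | none => acc ++ pbRecords (l.dropWhile pbNotHeader)
      | some cid =>
          acc ++ [paRec cid (cur ++ (l.takeWhile pbNotHeader).map pbClean)]
            ++ pbRecords (l.dropWhile pbNotHeader) := by
  induction l generalizing acc oid cur with
  | nil =>
    cases oid with
    | none => simp [paFinish, pbRecords_nil]
    | some cid => simp [paFinish, paRec, pbRecords_nil]
  | cons h t ih =>
    have hsh : PySem.Chars.strIsspace h.toList = false := hl h (by simp)
    have hlt : ∀ x ∈ t, PySem.Chars.strIsspace x.toList = false := fun x hx => hl x (by simp [hx])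
    by_cases hh : PySem.Chars.startswith h.toList ['#', '#', '#'] = true
    · have e : ∀ a c, paStep (a, oid, c) h =
          ((match oid with
            | some cid => a ++ [paRec cid c]
            | none => a),
           some (PySem.Str.strip (PySem.Str.slice h (some 3) none)), []) := by
        intro a c; simp [paStep, hsh, hh, paRec]
      cases oid with
      | none =>
        simp only [List.foldl_cons, e]
        rw [ih hlt]
        have hd : List.dropWhile pbNotHeader (h :: t) = h :: t := by
          simp [pbNotHeader, hh]
        rw [hd, pbRecords_cons]
        simp [paRec]
      | some cid =>
        simp only [List.foldl_cons, e]
        rw [ih hlt]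
        have hd : List.dropWhile pbNotHeader (h :: t) = h :: t := by
          simp [pbNotHeader, hh]
        have ht : List.takeWhile pbNotHeader (h :: t) = [] := by
          simp [pbNotHeader, hh]
        rw [hd, ht, pbRecords_cons]
        simp [paRec]
    · have e : ∀ a c, paStep (a, oid, c) h = (a, oid, c ++ [pbClean h]) := by
        intro a c; simp [paStep, pbClean, hsh, hh]
      cases oid with
      | none =>
        simp only [List.foldl_cons, e]
        rw [ih hlt]
        simp [pbNotHeader, hh]
      | some cid =>
        simp only [List.foldl_cons, e]
        rw [ih hlt]
        simp [pbNotHeader, hh]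

-- ===== VERDICT (by name: the statement is the Claim_ definition above) =====
theorem preprocess_abstracts_spec : Claim_equal_preprocess_abstracts := by
  intro lines _
  show preprocess_abstracts lines = preprocess_abstracts_alt lines
  have h1 : preprocess_abstracts lines = paFinish (lines.foldl paStep ([], none, [])) := rfl
  rw [h1, paFold_filter]
  rw [paFold_spec _ (by intro x hx; simpa using (List.mem_filter.mp hx).2)]
  simp [preprocess_abstracts_alt]
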